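-- pv_equiv track=rewrite | github.com/ffavela/isonav | isonavScripts/binCor/chimeraGL.py | getGRelList
-- ===== SOURCE A (Python) =====
-- edges = (
--     (0,1),
--     (0,3),
--     (0,4),
--     (1,2),
--     (1,5),
--     (2,3),
--     (2,6),
--     (3,7),
--     (4,5),
--     (4,7),
--     (5,6),
--     (6,7)
--     )
--
-- def myRelAdd(i,myIntList):
--     return tuple([e+i for e in myIntList])
--
-- def getGRelList(telesCoordLists,boolSurf=False):
--     gTelVertList=[]
--     gEdgeList=[]
--     tCoordLen=8 #Number of verticies on a single telescope
--     myShift=0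
--     for tCoordPL in telesCoordLists:
--         gTelVertList+=tCoordPL
--
--         subRel=[myRelAdd(myShift,myEdgeRel) for myEdgeRel in edges]
--         gEdgeList+=subRel
--         myShift+=tCoordLen
--
--     return gTelVertList,gEdgeList
-- ===== SOURCE B (Python) =====
-- edges = (
--     (0,1),
--     (0,3),
--     (0,4),
--     (1,2),
--     (1,5),
--     (2,3),
--     (2,6),
--     (3,7),
--     (4,5),
--     (4,7),
--     (5,6),
--     (6,7)
--     )
--
-- def getGRelList(telesCoordLists, boolSurf=False):
--     # Structural recursion on the list of telescopes: the first telescope uses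
--     # the base `edges` unshifted, and the ENTIRE recursively-built edge list of
--     # the remaining telescopes is translated by 8.  No shift accumulator and no
--     # index arithmetic: offsets arise from repeated translation of the suffix.
--     if not telesCoordLists:
--         return [], []
--     restVerts, restEdges = getGRelList(telesCoordLists[1:], boolSurf)
--     verts = list(telesCoordLists[0]) + restVerts
--     edgeList = list(edges) + [(a + 8, b + 8) for (a, b) in restEdges]
--     return verts, edgeList
-- ===== Notes on version B (the rewrite author's own statement) =====
-- stated objective: alternative
-- what changed: Replaces A's single forward pass with a running myShift accumulator by structural recursion on the telescope list: the suffix's whole edge list is built first and then translated by 8, so offsets come from repeated translation of the recursive result instead of an accumulated shift applied per block.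
import Mathlib
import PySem

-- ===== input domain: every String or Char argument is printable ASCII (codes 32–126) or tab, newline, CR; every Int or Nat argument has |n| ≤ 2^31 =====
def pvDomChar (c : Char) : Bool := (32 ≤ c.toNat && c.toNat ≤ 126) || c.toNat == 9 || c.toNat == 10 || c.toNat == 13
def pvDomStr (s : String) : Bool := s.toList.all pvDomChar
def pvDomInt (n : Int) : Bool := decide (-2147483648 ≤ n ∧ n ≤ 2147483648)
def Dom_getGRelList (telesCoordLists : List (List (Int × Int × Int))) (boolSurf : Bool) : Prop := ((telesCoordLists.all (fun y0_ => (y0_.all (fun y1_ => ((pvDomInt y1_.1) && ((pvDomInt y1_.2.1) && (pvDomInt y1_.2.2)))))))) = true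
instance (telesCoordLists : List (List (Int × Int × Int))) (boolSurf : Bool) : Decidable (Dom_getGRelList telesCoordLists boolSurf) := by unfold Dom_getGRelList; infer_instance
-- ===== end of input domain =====

-- B rebuilds the same vertex/edge lists by structural recursion, translating the suffix's edge list by 8 instead of keeping A's running myShift accumulator; alternative decomposition, same result.


-- ===== PORT A =====
-- module constant `edges` (shared context of both implementations)
def pyEdges : List (Int × Int) :=
  [(0,1),(0,3),(0,4),(1,2),(1,5),(2,3),(2,6),(3,7),(4,5),(4,7),(5,6),(6,7)]

def myRelAdd (i : Int) (myIntList : Int × Int) : Int × Int :=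
  (myIntList.1 + i, myIntList.2 + i)

def getGRelList (telesCoordLists : List (List (Int × Int × Int))) (boolSurf : Bool) : (List (Int × Int × Int)) × (List (Int × Int)) :=
  let st := telesCoordLists.foldl
    (fun (st : List (Int × Int × Int) × List (Int × Int) × Int) tCoordPL =>
      let gTelVertList := st.1 ++ tCoordPL
      let subRel := pyEdges.map (fun myEdgeRel => myRelAdd st.2.2 myEdgeRel)
      let gEdgeList := st.2.1 ++ subRel
      (gTelVertList, gEdgeList, st.2.2 + 8))
    ([], [], 0)
  (st.1, st.2.1)

-- ===== PORT B =====
-- structural recursion: the suffix's whole edge list is translated by 8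
def getGRelList_alt (telesCoordLists : List (List (Int × Int × Int))) (boolSurf : Bool) : (List (Int × Int × Int)) × (List (Int × Int)) :=
  match telesCoordLists with
  | [] => ([], [])
  | tCoordPL :: rest =>
    let r := getGRelList_alt rest boolSurf
    (tCoordPL ++ r.1, pyEdges ++ r.2.map (fun p => (p.1 + 8, p.2 + 8)))

-- ===== PRECONDITION & SPEC =====
def Spec_getGRelList (telesCoordLists : List (List (Int × Int × Int))) (boolSurf : Bool) (out : (List (Int × Int × Int)) × (List (Int × Int))) : Prop := out = getGRelList_alt telesCoordLists boolSurf
instance (telesCoordLists : List (List (Int × Int × Int))) (boolSurf : Bool) (out : (List (Int × Int × Int)) × (List (Int × Int))) : Decidable (Spec_getGRelList telesCoordLists boolSurf out) := by unfold Spec_getGRelList; infer_instance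

-- ===== CLAIM (what is proved, stated in full; the proofs are below) =====
def Claim_equal_getGRelList : Prop := ∀ (telesCoordLists : List (List (Int × Int × Int))) (boolSurf : Bool), Dom_getGRelList telesCoordLists boolSurf → Spec_getGRelList telesCoordLists boolSurf (getGRelList telesCoordLists boolSurf)

-- ===== LEMMAS AND PROOFS =====

-- ===== VERDICT (by name: the statement is the Claim_ definition above) =====
-- A's fold with accumulator (vs, es, k), described in terms of B's recursion:
-- the vertices flatten on, the edges are B's edges shifted by k.
theorem foldA_closed (t : List (List (Int × Int × Int))) (b : Bool) :
    ∀ (vs : List (Int × Int × Int)) (es : List (Int × Int)) (k : Int),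
    t.foldl
      (fun (st : List (Int × Int × Int) × List (Int × Int) × Int) tCoordPL =>
        (st.1 ++ tCoordPL, st.2.1 ++ pyEdges.map (fun e => myRelAdd st.2.2 e), st.2.2 + 8))
      (vs, es, k)
    = (vs ++ (getGRelList_alt t b).1,
       es ++ (getGRelList_alt t b).2.map (fun p => (p.1 + k, p.2 + k)),
       k + 8 * t.length) := by
  induction t with
  | nil => simp [getGRelList_alt]
  | cons h tl ih =>
    intro vs es k
    rw [List.foldl_cons, ih]
    simp only [getGRelList_alt, List.map_append, List.map_map, List.append_assoc,
      List.length_cons]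
    refine Prod.ext ?_ (Prod.ext ?_ ?_)
    · simp
    · simp only []
      congr 1
      congr 1
      all_goals (try (apply List.map_congr_left; intro p _))
      all_goals simp only [Function.comp_apply]
      all_goals exact Prod.ext (by ring) (by ring)
    · simp only []
      push_cast
      ring

-- ===== VERDICT (by name: the statement is the Claim_ definition above) =====
theorem getGRelList_spec : Claim_equal_getGRelList := by
  intro t b _
  unfold Spec_getGRelList getGRelList
  rw [foldA_closed t b]
  simp
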